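-- pv_equiv track=rewrite | github.com/SalamReal/Salam_TEST | KiCad/diff_netcount.py | interprete_parsed
-- ===== SOURCE A (Python) =====
-- def interprete_parsed(parsed_diff):
--     max = len(parsed_diff)-1
--     netcount = 0
--     skipped = 0
--     for i in range(max):
--         if i != max and i+1 != max:
--             a = parsed_diff[i]
--             b = parsed_diff[i+1]
--             # Wenn a removed wurde und b hinzugefügt wurde und sie direkte nachbarn sind -> Ersetzt
--             if a[1] == False and b[1] == True and (a[0]-b[0]) < 2:
--                 skipped += 1
--                 continue #skippe zähler
--         netcount += 1
--     return [netcount, skipped]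
-- ===== SOURCE B (Python) =====
-- def interprete_parsed(parsed_diff):
--     # Greedy pair consumption over the body (all but the last element): a matching
--     # removed/added pair can never be followed immediately by another match (its
--     # second element is 'added'), so consuming two body positions per match is exact.
--     body = parsed_diff[:-1]
--     m = len(body)
--     netcount = 0
--     skipped = 0
--     i = 0
--     while i < m:
--         if i + 1 < m and (not body[i][1]) and body[i + 1][1] and body[i][0] - body[i + 1][0] < 2:
--             skipped += 1
--             netcount += 1
--             i += 2
--         else:
--             netcount += 1
--             i += 1
--     return [netcount, skipped]
-- ===== Notes on version B (the rewrite author's own statement) =====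
-- stated objective: alternative
-- what changed: B slices off the last element once and then traverses the body with a greedy two-position advance: each matching removed/added pair consumes two positions at once (exact because a match's second element is 'added', so matches can never be adjacent), replacing A's fixed per-index range loop with its i!=max guard and continue.
import Mathlib
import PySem

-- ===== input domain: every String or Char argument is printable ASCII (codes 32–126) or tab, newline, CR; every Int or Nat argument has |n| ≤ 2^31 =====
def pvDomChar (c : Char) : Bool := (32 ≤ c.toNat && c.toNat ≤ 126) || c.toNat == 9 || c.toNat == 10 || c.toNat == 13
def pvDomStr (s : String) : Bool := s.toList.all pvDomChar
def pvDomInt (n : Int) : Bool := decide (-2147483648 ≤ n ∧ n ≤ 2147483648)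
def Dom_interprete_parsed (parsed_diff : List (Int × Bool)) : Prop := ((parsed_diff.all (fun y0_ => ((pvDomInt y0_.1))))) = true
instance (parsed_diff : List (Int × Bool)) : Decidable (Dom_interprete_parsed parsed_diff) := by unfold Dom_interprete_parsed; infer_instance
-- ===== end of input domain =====

-- B drops the last element once and traverses the body greedily, consuming TWO positions
-- per matching removed/added pair (matches cannot be adjacent), instead of A's per-index
-- range loop with a guard and continue; an alternative traversal, same cost.

-- ===== PORT A =====
-- loop body of A's 'for i in range(max)'; indices are in range where the guard holds,
-- so pyGetD is exact for Python's parsed_diff[i]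
def ipStep (parsed_diff : List (Int × Bool)) (mx : Int) (st : Int × Int) (i : Int) : Int × Int :=
  if i ≠ mx ∧ i + 1 ≠ mx then
    let a := PySem.List.pyGetD parsed_diff i (0, false)
    let b := PySem.List.pyGetD parsed_diff (i + 1) (0, false)
    if a.2 = false ∧ b.2 = true ∧ a.1 - b.1 < 2 then
      (st.1, st.2 + 1)      -- skipped += 1; continue
    else
      (st.1 + 1, st.2)      -- netcount += 1
  else
    (st.1 + 1, st.2)        -- netcount += 1

def interprete_parsed (parsed_diff : List (Int × Bool)) : List Int :=
  let mx := PySem.List.len parsed_diff - 1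
  let st := (PySem.List.pyRange 0 mx 1).foldl (ipStep parsed_diff mx) (0, 0)
  [st.1, st.2]

-- ===== PORT B =====
-- the match test of B's while loop on body positions i and i+1
def ipMatch (body : List (Int × Bool)) (i : Nat) : Bool :=
  let a := PySem.List.pyGetD body (i : Int) (0, false)
  let b := PySem.List.pyGetD body ((i : Int) + 1) (0, false)
  (!a.2) && b.2 && decide (a.1 - b.1 < 2)

-- B's while loop: greedy scan, advancing by 2 on a match, by 1 otherwise
def ipGo (body : List (Int × Bool)) (m i : Nat) (net sk : Int) : Int × Int :=
  if _h : i < m then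
    if i + 1 < m ∧ ipMatch body i then
      ipGo body m (i + 2) (net + 1) (sk + 1)
    else
      ipGo body m (i + 1) (net + 1) sk
  else
    (net, sk)
  termination_by m - i

def interprete_parsed_alt (parsed_diff : List (Int × Bool)) : List Int :=
  let body := PySem.List.slice parsed_diff none (some (-1))
  let st := ipGo body body.length 0 0 0
  [st.1, st.2]

-- ===== PRECONDITION & SPEC =====
def Spec_interprete_parsed (parsed_diff : List (Int × Bool)) (out : List Int) : Prop := out = interprete_parsed_alt parsed_diff
instance (parsed_diff : List (Int × Bool)) (out : List Int) : Decidable (Spec_interprete_parsed parsed_diff out) := by unfold Spec_interprete_parsed; infer_instance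

-- ===== CLAIM (what is proved, stated in full; the proofs are below) =====
def Claim_equal_interprete_parsed : Prop := ∀ (parsed_diff : List (Int × Bool)), Dom_interprete_parsed parsed_diff → Spec_interprete_parsed parsed_diff (interprete_parsed parsed_diff)

-- ===== LEMMAS AND PROOFS =====

-- A's guard-and-condition combined into one Boolean test
def ipFull (parsed_diff : List (Int × Bool)) (mx : Int) (i : Int) : Bool :=
  decide (i ≠ mx ∧ i + 1 ≠ mx) &&
    (let a := PySem.List.pyGetD parsed_diff i (0, false)
     let b := PySem.List.pyGetD parsed_diff (i + 1) (0, false)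
     decide (a.2 = false ∧ b.2 = true ∧ a.1 - b.1 < 2))

theorem ipStep_eq_if (parsed_diff : List (Int × Bool)) (mx : Int) (st : Int × Int) (i : Int) :
    ipStep parsed_diff mx st i =
      if ipFull parsed_diff mx i then (st.1, st.2 + 1) else (st.1 + 1, st.2) := by
  simp only [ipStep, ipFull]
  by_cases h : i ≠ mx ∧ i + 1 ≠ mx <;> simp [h]

-- loop invariant for A: the fold adds (steps - hits) to netcount and hits to skipped
theorem foldl_ipStep (parsed_diff : List (Int × Bool)) (mx : Int) :
    ∀ (L : List Int) (nc sk : Int),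
      L.foldl (ipStep parsed_diff mx) (nc, sk) =
        (nc + ((L.length : Int) - (L.countP (ipFull parsed_diff mx) : Int)),
         sk + (L.countP (ipFull parsed_diff mx) : Int)) := by
  intro L
  induction L with
  | nil => intro nc sk; simp
  | cons x xs ih =>
    intro nc sk
    simp only [List.foldl_cons, ipStep_eq_if, List.countP_cons, List.length_cons]
    by_cases h : ipFull parsed_diff mx x = true
    · rw [if_pos h, ih]
      simp only [h, if_true, Prod.mk.injEq]
      omega
    · rw [if_neg h, ih]
      simp only [h, if_false, Bool.false_eq_true, Prod.mk.injEq]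
      omega

-- matches are never adjacent: a match's second element has flag True
theorem ipMatch_not_adjacent (body : List (Int × Bool)) (i : Nat) :
    ipMatch body i = true → ipMatch body (i + 1) = false := by
  intro h
  simp only [ipMatch, Bool.and_eq_true, Bool.not_eq_eq_eq_not, Bool.not_true] at h ⊢
  have hx : ((i : Nat) + 1 : Int) = ((i + 1 : Nat) : Int) := by push_cast; ring
  rw [hx] at h
  by_contra hc
  simp only [Bool.not_eq_false, Bool.and_eq_true, Bool.not_eq_eq_eq_not, Bool.not_true] at hc
  rw [hc.1.1] at h
  exact absurd h.1.2 (by simp)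

-- B-side count of matching positions from i up to m-1
def ipCnt (body : List (Int × Bool)) (m i : Nat) : Nat :=
  (PySem.List.pyRange (i : Int) ((m : Int) - 1) 1).countP
    (fun j => ipMatch body j.toNat)

theorem ipCnt_of_ge (body : List (Int × Bool)) (m i : Nat) (h : m ≤ i + 1) :
    ipCnt body m i = 0 := by
  unfold ipCnt
  rw [PySem.List.pyRange_one_eq_nil (by omega)]
  rfl

theorem ipCnt_cons (body : List (Int × Bool)) (m i : Nat) (h : i + 1 < m) :
    ipCnt body m i = (if ipMatch body i then 1 else 0) + ipCnt body m (i + 1) := by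
  unfold ipCnt
  rw [PySem.List.pyRange_one_cons (by omega)]
  have : ((i : Int) + 1) = ((i + 1 : Nat) : Int) := by push_cast; ring
  rw [List.countP_cons, this]
  simp only [Int.toNat_natCast]
  by_cases hm : ipMatch body i <;> simp [hm] <;> omega

-- pyGetD sees through dropLast for in-range indices
theorem pyGetD_dropLast (xs : List (Int × Bool)) (j : Int) (d : Int × Bool)
    (h0 : 0 ≤ j) (h : j < (xs.length : Int) - 1) :
    PySem.List.pyGetD xs.dropLast j d = PySem.List.pyGetD xs j d := by
  have h1 : j.toNat < xs.dropLast.length := by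
    rw [List.length_dropLast]; omega
  have h2 : j.toNat < xs.length := by omega
  rw [PySem.List.pyGetD_eq_getElem _ _ h0 (by push_cast [List.length_dropLast]; omega),
      PySem.List.pyGetD_eq_getElem _ _ h0 (by omega)]
  exact List.getElem_dropLast h1

-- B's loop invariant: greedy consumption yields net = iterations = m - i - cnt and
-- sk = cnt, exact because matches are never adjacent
theorem ipGo_spec_aux (body : List (Int × Bool)) (m : Nat) :
    ∀ (k i : Nat) (net sk : Int), m - i ≤ k → i ≤ m →
      ipGo body m i net sk =
        (net + ((m : Int) - (i : Int) - (ipCnt body m i : Int)),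
         sk + (ipCnt body m i : Int)) := by
  intro k
  induction k with
  | zero =>
    intro i net sk hk hi
    have him : i = m := by omega
    subst him
    rw [ipGo, dif_neg (by omega), ipCnt_of_ge _ _ _ (by omega)]
    simp
  | succ k ih =>
    intro i net sk hk hi
    by_cases hlt : i < m
    · rw [ipGo, dif_pos hlt]
      by_cases hc : i + 1 < m ∧ ipMatch body i = true
      · rw [if_pos hc]
        obtain ⟨h1, hmt⟩ := hc
        have hcnt1 : ipCnt body m i = 1 + ipCnt body m (i + 1) := by
          rw [ipCnt_cons _ _ _ h1, if_pos hmt]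
        have hcnt2 : ipCnt body m (i + 1) = ipCnt body m (i + 2) := by
          by_cases h2 : i + 2 < m
          · rw [ipCnt_cons _ _ _ (by omega : (i + 1) + 1 < m),
              ipMatch_not_adjacent _ _ hmt]
            simp
          · rw [ipCnt_of_ge _ _ _ (by omega), ipCnt_of_ge _ _ _ (by omega)]
        rw [ih (i + 2) (net + 1) (sk + 1) (by omega) (by omega), hcnt1, hcnt2]
        simp only [Prod.mk.injEq]
        push_cast
        exact ⟨by ring, by ring⟩
      · rw [if_neg hc]
        have hcnt : ipCnt body m i = ipCnt body m (i + 1) := by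
          by_cases h1 : i + 1 < m
          · have hm0 : ipMatch body i = false := by
              by_contra hh
              exact hc ⟨h1, by simpa using hh⟩
            rw [ipCnt_cons _ _ _ h1, hm0]
            simp
          · rw [ipCnt_of_ge _ _ _ (by omega), ipCnt_of_ge _ _ _ (by omega)]
        rw [ih (i + 1) (net + 1) sk (by omega) (by omega), hcnt]
        simp only [Prod.mk.injEq]
        push_cast
        exact ⟨by ring, trivial⟩
    · have him : i = m := by omega
      subst him
      rw [ipGo, dif_neg (by omega), ipCnt_of_ge _ _ _ (by omega)]
      simp

theorem ipGo_spec (body : List (Int × Bool)) (m : Nat) (hm : m = body.length) :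
    ipGo body m 0 0 0 = ((m : Int) - (ipCnt body m 0 : Int), (ipCnt body m 0 : Int)) := by
  have := ipGo_spec_aux body m m 0 0 0 (by omega) (by omega)
  simpa using this

-- the greedy count over the body equals A's guarded count over range(len-1)
theorem ipCnt_eq_countA (parsed_diff : List (Int × Bool)) :
    ((ipCnt parsed_diff.dropLast parsed_diff.dropLast.length 0 : Int)) =
    ((PySem.List.pyRange 0 ((parsed_diff.length : Int) - 1) 1).countP
        (ipFull parsed_diff ((parsed_diff.length : Int) - 1)) : Int) := by
  set n : Int := (parsed_diff.length : Int) with hn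
  have hn0 : 0 ≤ n := by positivity
  have hm : (parsed_diff.dropLast.length : Int) = max (n - 1) 0 := by
    rw [List.length_dropLast]; omega
  by_cases h2 : n ≤ 1
  · unfold ipCnt
    rw [PySem.List.pyRange_one_eq_nil (by omega), PySem.List.pyRange_one_eq_nil (by omega)]
    simp
  · have hsplit : PySem.List.pyRange 0 (n - 1) 1 =
        PySem.List.pyRange 0 (n - 2) 1 ++ PySem.List.pyRange (n - 2) (n - 1) 1 :=
      PySem.List.pyRange_one_append 0 (n - 2) (n - 1) (by omega) (by omega)
    have hlast : PySem.List.pyRange (n - 2) (n - 1) 1 = [n - 2] := by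
      have := PySem.List.pyRange_one_singleton (n - 2)
      rw [show n - 1 = (n - 2) + 1 by ring]; exact this
    have hlastF : ipFull parsed_diff (n - 1) (n - 2) = false := by
      have h1 : n - 2 + 1 = n - 1 := by ring
      simp [ipFull, h1]
    have hrangeB : ipCnt parsed_diff.dropLast parsed_diff.dropLast.length 0 =
        (PySem.List.pyRange 0 (n - 2) 1).countP
          (fun j => ipMatch parsed_diff.dropLast j.toNat) := by
      unfold ipCnt
      have : (parsed_diff.dropLast.length : Int) - 1 = n - 2 := by omega
      rw [this]
      norm_num
    rw [hrangeB, hsplit, hlast, List.countP_append]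
    have hcong : (PySem.List.pyRange 0 (n - 2) 1).countP (ipFull parsed_diff (n - 1)) =
        (PySem.List.pyRange 0 (n - 2) 1).countP
          (fun j => ipMatch parsed_diff.dropLast j.toNat) := by
      apply List.countP_congr
      intro j hj
      rw [PySem.List.mem_pyRange_one] at hj
      have hguard : j ≠ n - 1 ∧ j + 1 ≠ n - 1 := by omega
      have hjcast : ((j.toNat : Nat) : Int) = j := by omega
      have hjcast1 : ((j.toNat : Nat) : Int) + 1 = j + 1 := by omega
      simp only [ipFull, ipMatch, hguard, ne_eq, not_false_eq_true, and_self,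
        decide_true, Bool.true_and, hjcast,
        pyGetD_dropLast parsed_diff j _ hj.1 (by omega),
        pyGetD_dropLast parsed_diff (j + 1) _ (by omega) (by omega)]
      rcases (PySem.List.pyGetD parsed_diff j ((0 : Int), false)) with ⟨x, fx⟩
      rcases (PySem.List.pyGetD parsed_diff (j + 1) ((0 : Int), false)) with ⟨y, fy⟩
      cases fx <;> cases fy <;> simp
    rw [hcong]
    simp [hlastF]

-- ===== VERDICT (by name: the statement is the Claim_ definition above) =====
theorem interprete_parsed_spec : Claim_equal_interprete_parsed := by
  intro parsed_diff _
  unfold Spec_interprete_parsed interprete_parsed interprete_parsed_alt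
  rw [PySem.List.slice_to_neg_one]
  simp only [PySem.List.len_eq]
  rw [foldl_ipStep, ipGo_spec _ _ rfl, ipCnt_eq_countA]
  have hL : (((PySem.List.pyRange 0 ((parsed_diff.length : Int) - 1) 1).length : Int))
      = ((parsed_diff.dropLast.length : Int)) := by
    rw [PySem.List.length_pyRange_one, List.length_dropLast]; omega
  rw [hL]
  simp
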